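-- pv_equiv track=rewrite | github.com/Living-with-machines/PressDirectories | code/tools/linking_tools.py | filter_entry
-- ===== SOURCE A (Python) =====
-- from collections import defaultdict
--
-- def filter_entry(district,entry):
--     """returns entries as a mapping from tags to text
--     """
--     # remove BIOES tags
--     clip_bioes = lambda x: (x[1].split('-')[-1],x[0])
--
--     # convert entry to a list of (tag, token) tuples
--     ttt = map(clip_bioes, # list of tag token tuple
--                 filter(lambda x: x[1] not in ['O'], entry))
--
--
--     tag2text = defaultdict(str)
--
--     # add tokens their respective keys
--     for tag,token in ttt:
--         tag2text[tag] += token + ' '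
--
--     # add district
--     tag2text['DISTRICT'] = district
--     return tag2text
-- ===== SOURCE B (Python) =====
-- from collections import defaultdict
--
-- def filter_entry(district, entry):
--     """returns entries as a mapping from tags to text"""
--     # pass 1: clip BIOES prefixes, drop 'O' tokens
--     kept = [(tag.split('-')[-1], token) for token, tag in entry if tag != 'O']
--     # pass 2: distinct clipped tags in order of first appearance
--     tags = []
--     for t, _ in kept:
--         if t not in tags:
--             tags.append(t)
--     # pass 3: one scan per tag, concatenating that tag's tokens
--     tag2text = defaultdict(str)
--     for t in tags:
--         tag2text[t] = ''.join(tok + ' ' for tt, tok in kept if tt == t)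
--     tag2text['DISTRICT'] = district
--     return tag2text
-- ===== Notes on version B (the rewrite author's own statement) =====
-- stated objective: alternative
-- what changed: Replaces A's single pass that accumulates text per tag inside a defaultdict with a staged decomposition: clip/filter the pairs, dedup the clipped tags in first-appearance order, then build each tag's text by its own filtered scan over the kept pairs.
import Mathlib
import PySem

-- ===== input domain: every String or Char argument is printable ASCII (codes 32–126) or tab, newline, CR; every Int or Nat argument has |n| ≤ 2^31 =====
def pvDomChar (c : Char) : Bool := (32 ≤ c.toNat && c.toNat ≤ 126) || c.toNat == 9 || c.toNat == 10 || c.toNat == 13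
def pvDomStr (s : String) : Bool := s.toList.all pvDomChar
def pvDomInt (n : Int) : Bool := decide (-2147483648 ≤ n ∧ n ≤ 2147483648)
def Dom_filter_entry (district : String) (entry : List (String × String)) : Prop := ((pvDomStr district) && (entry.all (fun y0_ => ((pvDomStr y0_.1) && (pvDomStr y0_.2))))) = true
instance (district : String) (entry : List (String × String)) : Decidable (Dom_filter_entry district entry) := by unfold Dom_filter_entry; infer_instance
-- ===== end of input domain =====

-- B replaces A's single string-accumulating dict loop with a staged decomposition:
-- clip/filter, dedup the tags, then one filtered scan of the kept pairs per tag
-- (objective: alternative; same results, different traversal).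


-- ===== PORT A =====
-- clip_bioes = lambda x: (x[1].split('-')[-1], x[0])   (str.split never yields [], so the total [-1] is exact)
def pvClipBioes (x : String × String) : String × String :=
  (PySem.List.pyGetD ((PySem.Str.split? x.2 "-").getD []) (-1) "", x.1)

def filter_entry (district : String) (entry : List (String × String)) : List (String × String) :=
  let ttt := (entry.filter (fun x => !(["O"].contains x.2))).map pvClipBioes
  let tag2text := ttt.foldl (fun d p => d.modify p.1 "" (fun s => s ++ p.2 ++ " ")) PySem.Dict.empty
  (tag2text.insert "DISTRICT" district).items

-- ===== PORT B =====
-- tag.split('-')[-1]   (str.split never yields [], so the total [-1] is exact)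
def pvTagKey (tag : String) : String :=
  PySem.List.pyGetD ((PySem.Str.split? tag "-").getD []) (-1) ""

def filter_entry_alt (district : String) (entry : List (String × String)) : List (String × String) :=
  -- pass 1: clip BIOES prefixes, drop 'O' tokens
  let kept := (entry.filter (fun x => x.2 != "O")).map (fun x => (pvTagKey x.2, x.1))
  -- pass 2: distinct clipped tags in order of first appearance
  let tags := kept.foldl (fun ts p => if ts.contains p.1 then ts else ts ++ [p.1]) ([] : List String)
  -- pass 3: one scan per tag, concatenating that tag's tokens
  let tag2text := tags.foldl
    (fun d t =>
      d.insert t (PySem.Str.join "" ((kept.filter (fun q => q.1 == t)).map (fun q => q.2 ++ " "))))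
    PySem.Dict.empty
  (tag2text.insert "DISTRICT" district).items

-- ===== PRECONDITION & SPEC =====
def Spec_filter_entry (district : String) (entry : List (String × String)) (out : List (String × String)) : Prop := out = filter_entry_alt district entry
instance (district : String) (entry : List (String × String)) (out : List (String × String)) : Decidable (Spec_filter_entry district entry out) := by unfold Spec_filter_entry; infer_instance

-- ===== CLAIM (what is proved, stated in full; the proofs are below) =====
def Claim_equal_filter_entry : Prop := ∀ (district : String) (entry : List (String × String)), Dom_filter_entry district entry → Spec_filter_entry district entry (filter_entry district entry)

-- ===== LEMMAS AND PROOFS =====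

-- ''.join over a cons (empty separator)
lemma pvJoinE_cons (a : String) (xs : List String) :
    PySem.Str.join "" (a :: xs) = a ++ PySem.Str.join "" xs := by
  cases xs with
  | nil => simp [PySem.Str.join, PySem.Chars.join, List.intercalate]
  | cons b l => simp [PySem.Str.join, PySem.Chars.join, List.intercalate]

-- A's string-accumulating fold, characterised per key as B's filtered join
lemma pvGetD_strFold (l : List (String × String)) (d : PySem.Dict String String) (t : String) :
    (l.foldl (fun d p => d.modify p.1 "" (fun s => s ++ p.2 ++ " ")) d).getD t ""
      = d.getD t "" ++ PySem.Str.join "" ((l.filter (fun q => q.1 == t)).map (fun q => q.2 ++ " ")) := by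
  induction l generalizing d with
  | nil => simp [PySem.Str.join, PySem.Chars.join, List.intercalate]
  | cons p l ih =>
      rw [List.foldl_cons, ih]
      by_cases h : p.1 = t
      · rw [PySem.Dict.getD_modify]
        simp [h, pvJoinE_cons, String.append_assoc]
      · rw [PySem.Dict.getD_modify, if_neg (fun hh => h hh.symm),
          List.filter_cons_of_neg (by simp [h])]

-- B's dedup fold IS PySem.Set.update over the projected keys
lemma pvTags_eq (l : List (String × String)) :
    l.foldl (fun ts p => if ts.contains p.1 then ts else ts ++ [p.1]) ([] : List String)
      = PySem.Set.update ([] : List String) (l.map (fun p => p.1)) := by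
  simp [PySem.Set.update, PySem.Set.add, List.foldl_map]

-- ===== VERDICT (by name: the statement is the Claim_ definition above) =====
theorem filter_entry_spec : Claim_equal_filter_entry := by
  intro district entry _hdom
  show filter_entry district entry = filter_entry_alt district entry
  dsimp only [filter_entry, filter_entry_alt]
  -- B's kept list is A's ttt list
  have hk : (entry.filter (fun x => x.2 != "O")).map (fun x => (pvTagKey x.2, x.1))
      = (entry.filter (fun x => !(["O"].contains x.2))).map pvClipBioes := by
    have hf : entry.filter (fun x => x.2 != "O")
        = entry.filter (fun x => !(["O"].contains x.2)) :=
      List.filter_congr (fun x _ => by cases h : x.2 == "O" <;> simp_all [bne])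
    rw [hf]
    exact List.map_congr_left (fun x _ => rfl)
  rw [hk]
  set L := (entry.filter (fun x => !(["O"].contains x.2))).map pvClipBioes with hL
  set DA := L.foldl (fun d p => d.modify p.1 "" (fun s => s ++ p.2 ++ " ")) PySem.Dict.empty with hDA
  have hkeys : DA.keys = PySem.Set.update ([] : List String) (L.map (fun p => p.1)) := by
    rw [hDA, PySem.Dict.keys_foldl_modify_key L (fun p => p.1) "" (fun _ p s => s ++ p.2 ++ " ")]
    rfl
  have hnd : DA.keys.Nodup := by
    rw [hDA]
    exact PySem.Dict.nodup_keys_foldl_modify_key L (fun p => p.1) "" _ _ PySem.Dict.nodup_keys_empty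
  rw [pvTags_eq, ← hkeys]
  have hBitems : (DA.keys.foldl (fun d t =>
        d.insert t (PySem.Str.join "" ((L.filter (fun q => q.1 == t)).map (fun q => q.2 ++ " "))))
        PySem.Dict.empty).items
      = DA.keys.map (fun t =>
          (t, PySem.Str.join "" ((L.filter (fun q => q.1 == t)).map (fun q => q.2 ++ " ")))) := by
    simpa using PySem.Dict.items_foldl_insert_fresh DA.keys (fun t => t)
      (fun t => PySem.Str.join "" ((L.filter (fun q => q.1 == t)).map (fun q => q.2 ++ " ")))
      PySem.Dict.empty (by intro a _; simp) (by simpa using hnd)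
  have hAB : DA = DA.keys.foldl (fun d t =>
        d.insert t (PySem.Str.join "" ((L.filter (fun q => q.1 == t)).map (fun q => q.2 ++ " "))))
        PySem.Dict.empty := by
    apply PySem.Dict.ext
    rw [hBitems, PySem.Dict.items_eq_map_keys DA hnd ""]
    apply List.map_congr_left
    intro t _
    rw [hDA, pvGetD_strFold]
    simp
  rw [← hAB]
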